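-- pv_equiv track=rewrite | github.com/mozilla/MozDef | alerts/plugins/possible_usernames.py | _most_common_hostname
-- ===== SOURCE A (Python) =====
-- import typing as types
--
-- def _most_common_hostname(events: types.List[dict]) -> types.Optional[str]:
--     findings = {}
--
--     for event in events:
--         host = event.get('documentsource', {}).get('hostname')
--
--         if host is None:
--             continue
--
--         findings[host] = (findings[host] + 1) if host in findings else 1
--
--     # Sorting a list of (int, str) pairs results in a sort on the int.
--     sorted_findings = sorted(
--         [(count, hostname) for hostname, count in findings.items()],
--         reverse=True)
--
--     if len(sorted_findings) == 0:
--         return None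
--
--     return sorted_findings[0][1]
-- ===== SOURCE B (Python) =====
-- import typing as types
--
-- def _most_common_hostname(events: types.List[dict]) -> types.Optional[str]:
--     # One pass: maintain counts and the running best (count, hostname) tuple; no sort.
--     counts = {}
--     best = None
--     for event in events:
--         host = event.get('documentsource', {}).get('hostname')
--         if host is None:
--             continue
--         count = counts.get(host, 0) + 1
--         counts[host] = count
--         if best is None or (count, host) > best:
--             best = (count, host)
--     return None if best is None else best[1]
-- ===== Notes on version B (the rewrite author's own statement) =====
-- stated objective: alternative
-- what changed: Replaces the build-counter-then-reverse-sort-and-take-head pipeline by a single pass that updates counts together with a running best (count, hostname) tuple and returns its hostname, with no sort.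
import Mathlib
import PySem

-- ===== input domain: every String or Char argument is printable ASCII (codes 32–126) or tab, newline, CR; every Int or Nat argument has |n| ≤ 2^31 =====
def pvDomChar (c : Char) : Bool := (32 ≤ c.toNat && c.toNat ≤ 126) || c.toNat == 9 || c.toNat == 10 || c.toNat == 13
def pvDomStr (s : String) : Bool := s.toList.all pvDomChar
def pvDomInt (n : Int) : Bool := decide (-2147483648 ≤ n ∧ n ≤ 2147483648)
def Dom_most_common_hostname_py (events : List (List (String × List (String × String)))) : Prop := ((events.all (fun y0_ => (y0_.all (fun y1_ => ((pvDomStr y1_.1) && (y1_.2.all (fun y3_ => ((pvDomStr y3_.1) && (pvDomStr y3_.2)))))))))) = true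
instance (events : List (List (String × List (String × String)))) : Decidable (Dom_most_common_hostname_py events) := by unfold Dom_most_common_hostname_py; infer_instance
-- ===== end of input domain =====

-- B replaces A's build-counter-then-reverse-sort-and-take-head pipeline by a single pass
-- maintaining the counts together with a running best (count, hostname) tuple (alternative decomposition).

-- shared line of Python: event.get('documentsource', {}).get('hostname')
def pvGetHost (event : List (String × List (String × String))) : Option String :=
  (PySem.Dict.mk ((PySem.Dict.mk event).getD "documentsource" [])).get? "hostname"

-- ===== PORT A =====
def most_common_hostname_py (events : List (List (String × List (String × String)))) : Option String :=
  let findings := events.foldl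
    (fun (d : PySem.Dict String Int) ev =>
      match pvGetHost ev with
      | none => d
      | some host => d.insert host (if d.contains host then (d.get? host).getD 0 + 1 else 1))
    PySem.Dict.empty
  let sorted_findings :=
    PySem.List.sorted2 (findings.items.map (fun p => (p.2, p.1))) Prod.fst Prod.snd true
  match sorted_findings with
  | [] => none
  | p :: _ => some p.2

-- ===== PORT B =====
def most_common_hostname_py_alt (events : List (List (String × List (String × String)))) : Option String :=
  let st := events.foldl
    (fun (st : PySem.Dict String Int × Option (Int × String)) ev =>
      match pvGetHost ev with
      | none => st
      | some host =>
        let count := st.1.getD host 0 + 1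
        let best := match st.2 with
          | none => some (count, host)
          | some b =>
            if decide (b.1 < count) || (b.1 == count && decide (b.2 < host)) then some (count, host)
            else some b
        (st.1.insert host count, best))
    (PySem.Dict.empty, none)
  match st.2 with
  | none => none
  | some b => some b.2

-- ===== PRECONDITION & SPEC =====
def Spec_most_common_hostname_py (events : List (List (String × List (String × String)))) (out : Option String) : Prop := out = most_common_hostname_py_alt events
instance (events : List (List (String × List (String × String)))) (out : Option String) : Decidable (Spec_most_common_hostname_py events out) := by unfold Spec_most_common_hostname_py; infer_instance

-- ===== CLAIM (what is proved, stated in full; the proofs are below) =====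
def Claim_equal_most_common_hostname_py : Prop := ∀ (events : List (List (String × List (String × String)))), Dom_most_common_hostname_py events → Spec_most_common_hostname_py events (most_common_hostname_py events)

-- ===== LEMMAS AND PROOFS =====

-- lexicographic order on (count, hostname) pairs, Python's tuple <
def pvLt (p q : Int × String) : Prop := p.1 < q.1 ∨ (p.1 = q.1 ∧ p.2 < q.2)

-- the Bool comparison sorted2 uses internally
def pvLtb (p q : Int × String) : Bool :=
  decide (p.1 < q.1) || (!decide (q.1 < p.1) && decide (p.2 < q.2))

theorem pvLtb_iff (p q : Int × String) : pvLtb p q = true ↔ pvLt p q := by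
  unfold pvLtb pvLt
  simp only [Bool.or_eq_true, Bool.and_eq_true, Bool.not_eq_eq_eq_not, Bool.not_true,
    decide_eq_true_eq, decide_eq_false_iff_not]
  constructor
  · rintro (h | ⟨h1, h2⟩)
    · exact Or.inl h
    · rcases lt_trichotomy p.1 q.1 with h' | h' | h'
      · exact Or.inl h'
      · exact Or.inr ⟨h', h2⟩
      · exact absurd h' h1
  · rintro (h | ⟨h1, h2⟩)
    · exact Or.inl h
    · exact Or.inr ⟨by omega, h2⟩

theorem pvLt_irrefl (p : Int × String) : ¬ pvLt p p := by
  unfold pvLt; rintro (h | ⟨_, h⟩) <;> exact lt_irrefl _ h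

theorem pvLt_trans {a b c : Int × String} (h1 : pvLt a b) (h2 : pvLt b c) : pvLt a c := by
  unfold pvLt at *
  rcases h1 with h1 | ⟨h1, h1'⟩ <;> rcases h2 with h2 | ⟨h2, h2'⟩
  · exact Or.inl (lt_trans h1 h2)
  · exact Or.inl (by omega)
  · exact Or.inl (by omega)
  · exact Or.inr ⟨by omega, lt_trans h1' h2'⟩

theorem pvLt_resolve {p q : Int × String} (h : ¬ pvLt p q) (hne : p ≠ q) : pvLt q p := by
  unfold pvLt at *
  rcases lt_trichotomy p.1 q.1 with h1 | h1 | h1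
  · exact absurd (Or.inl h1) h
  · rcases lt_trichotomy p.2 q.2 with h2 | h2 | h2
    · exact absurd (Or.inr ⟨h1, h2⟩) h
    · exact absurd (Prod.ext h1 h2) hne
    · exact Or.inr ⟨h1.symm, h2⟩
  · exact Or.inl h1

theorem pvLtb_irr (a : Int × String) : pvLtb a a = false := by
  rw [Bool.eq_false_iff]; intro h; exact pvLt_irrefl a ((pvLtb_iff a a).1 h)

theorem pvLtb_tr (a b c : Int × String) (h1 : pvLtb a b = true) (h2 : pvLtb b c = true) :
    pvLtb a c = true :=
  (pvLtb_iff a c).2 (pvLt_trans ((pvLtb_iff a b).1 h1) ((pvLtb_iff b c).1 h2))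

-- head of an insertBy-built list is maximal
def pvHeadMax (l : List (Int × String)) : Prop :=
  ∀ m, l.head? = some m → ∀ y ∈ l, pvLtb m y = false

theorem pv_insertBy_nil (before : Int × String → Int × String → Bool) (x : Int × String) :
    PySem.List.insertBy before x [] = [x] := rfl

theorem pv_insertBy_cons (before : Int × String → Int × String → Bool) (x y : Int × String)
    (ys : List (Int × String)) :
    PySem.List.insertBy before x (y :: ys) =
      if before x y then x :: y :: ys else y :: PySem.List.insertBy before x ys := rfl

theorem pv_insertBy_headMax (x : Int × String) (l : List (Int × String)) (h : pvHeadMax l) :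
    pvHeadMax (PySem.List.insertBy (fun a b => pvLtb b a) x l) := by
  cases l with
  | nil =>
    rw [pv_insertBy_nil]
    intro m hm y hy
    simp only [List.head?_cons, Option.some.injEq] at hm
    simp only [List.mem_singleton] at hy
    subst hm; subst hy; exact pvLtb_irr y
  | cons hd t =>
    rw [pv_insertBy_cons]
    by_cases hcase : pvLtb hd x = true
    · simp only [hcase, if_pos]
      intro m hm y hy
      simp only [List.head?_cons, Option.some.injEq] at hm
      subst hm
      rcases List.mem_cons.1 hy with rfl | hy'
      · exact pvLtb_irr _
      · have hmax := h hd rfl y hy'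
        rw [Bool.eq_false_iff]; intro habs
        have := pvLtb_tr hd x y hcase habs
        rw [hmax] at this; exact Bool.false_ne_true this
    · rw [Bool.not_eq_true] at hcase
      simp only [hcase, Bool.false_eq_true, if_false]
      intro m hm y hy
      simp only [List.head?_cons, Option.some.injEq] at hm
      subst hm
      rcases List.mem_cons.1 hy with rfl | hy'
      · exact pvLtb_irr _
      · rcases (PySem.List.mem_insertBy _ _ _ _).1 hy' with rfl | hy''
        · exact hcase
        · exact h hd rfl y (List.mem_cons_of_mem _ hy'')

theorem pv_foldl_insertBy_headMax (xs : List (Int × String)) :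
    ∀ l, pvHeadMax l →
      pvHeadMax (xs.foldl (fun acc x => PySem.List.insertBy (fun a b => pvLtb b a) x acc) l) := by
  induction xs with
  | nil => intro l h; exact h
  | cons x rest ih =>
    intro l h
    exact ih _ (pv_insertBy_headMax x l h)

theorem pv_sorted2_rev_eq (xs : List (Int × String)) :
    PySem.List.sorted2 xs Prod.fst Prod.snd true =
      xs.foldl (fun acc x => PySem.List.insertBy (fun a b => pvLtb b a) x acc) [] := rfl

-- the two loop bodies
def pvStepA (d : PySem.Dict String Int) (ev : List (String × List (String × String))) :
    PySem.Dict String Int :=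
  match pvGetHost ev with
  | none => d
  | some host => d.insert host (if d.contains host then (d.get? host).getD 0 + 1 else 1)

def pvStepB (st : PySem.Dict String Int × Option (Int × String))
    (ev : List (String × List (String × String))) :
    PySem.Dict String Int × Option (Int × String) :=
  match pvGetHost ev with
  | none => st
  | some host =>
    let count := st.1.getD host 0 + 1
    let best := match st.2 with
      | none => some (count, host)
      | some b =>
        if decide (b.1 < count) || (b.1 == count && decide (b.2 < host)) then some (count, host)
        else some b
    (st.1.insert host count, best)

theorem pvStep_fst (d : PySem.Dict String Int) (best : Option (Int × String))
    (ev : List (String × List (String × String))) :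
    (pvStepB (d, best) ev).1 = pvStepA d ev := by
  unfold pvStepA pvStepB
  cases pvGetHost ev with
  | none => rfl
  | some host =>
    simp only
    congr 1
    by_cases hc : d.contains host = true
    · have : (d.get? host).isSome := by rw [← PySem.Dict.contains_eq_isSome_get?]; exact hc
      rw [if_pos hc, PySem.Dict.getD_eq_get?_getD]
    · rw [Bool.not_eq_true] at hc
      rw [if_neg (by simp [hc]), PySem.Dict.getD_of_not_contains _ _ hc]
      norm_num

-- loop invariant: best is the unique lexicographic maximum of the (count, hostname) pairs
def pvInv (d : PySem.Dict String Int) (best : Option (Int × String)) : Prop :=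
  d.keys.Nodup ∧
  ((best = none ∧ d.items = []) ∨
   (∃ c h, best = some (c, h) ∧ (h, c) ∈ d.items ∧
      ∀ p ∈ d.items, p ≠ (h, c) → pvLt (p.2, p.1) (c, h)))

theorem pv_cond_iff (b1 : Int) (b2 : String) (c : Int) (h : String) :
    (decide (b1 < c) || (b1 == c && decide (b2 < h))) = true ↔ pvLt (b1, b2) (c, h) := by
  unfold pvLt
  simp only [Bool.or_eq_true, Bool.and_eq_true, decide_eq_true_eq, beq_iff_eq]

theorem pvStep_inv (d : PySem.Dict String Int) (best : Option (Int × String))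
    (ev : List (String × List (String × String))) (hinv : pvInv d best) :
    pvInv (pvStepB (d, best) ev).1 (pvStepB (d, best) ev).2 := by
  obtain ⟨hnd, hrest⟩ := hinv
  unfold pvStepB
  cases hh : pvGetHost ev with
  | none => exact ⟨hnd, hrest⟩
  | some host =>
    simp only
    refine ⟨PySem.Dict.nodup_keys_insert _ _ _ hnd, ?_⟩
    rcases hrest with ⟨hbn, hitems⟩ | ⟨c0, h0, hbs, hmem, hmax⟩
    · -- dict was empty: the new pair is the unique entry
      subst hbn
      refine Or.inr ⟨d.getD host 0 + 1, host, rfl, PySem.Dict.mem_items_insert_self _ _ _, ?_⟩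
      intro p hp hne
      rcases (PySem.Dict.mem_items_insert _ _ _ _).1 hp with rfl | ⟨hin, _⟩
      · exact absurd rfl hne
      · rw [hitems] at hin; exact absurd hin List.not_mem_nil
    · -- dict had a strict maximum (c0, h0)
      subst hbs
      simp only
      set c := d.getD host 0 + 1 with hc
      by_cases hlt : pvLt (c0, h0) (c, host)
      · rw [if_pos ((pv_cond_iff _ _ _ _).2 hlt)]
        refine Or.inr ⟨c, host, rfl, PySem.Dict.mem_items_insert_self _ _ _, ?_⟩
        intro p hp hne
        rcases (PySem.Dict.mem_items_insert _ _ _ _).1 hp with rfl | ⟨hin, hpne⟩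
        · exact absurd rfl hne
        · by_cases hpb : p = (h0, c0)
          · subst hpb; exact hlt
          · exact pvLt_trans (hmax p hin hpb) hlt
      · rw [if_neg (by rw [pv_cond_iff]; exact hlt)]
        have hne0 : h0 ≠ host := by
          intro he; subst he
          have : d.getD h0 0 = c0 := PySem.Dict.getD_of_mem_items _ hmem hnd 0
          exact hlt (Or.inl (by omega))
        refine Or.inr ⟨c0, h0, rfl, (PySem.Dict.mem_items_insert _ _ _ _).2 (Or.inr ⟨hmem, hne0⟩), ?_⟩
        intro p hp hne
        rcases (PySem.Dict.mem_items_insert _ _ _ _).1 hp with rfl | ⟨hin, hpne⟩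
        · exact pvLt_resolve hlt (by
            intro he; apply hne0
            exact congrArg Prod.snd he)
        · exact hmax p hin hne

theorem pv_fold (events : List (List (String × List (String × String)))) :
    ∀ (d : PySem.Dict String Int) (best : Option (Int × String)), pvInv d best →
      events.foldl pvStepA d = (events.foldl pvStepB (d, best)).1 ∧
      pvInv (events.foldl pvStepB (d, best)).1 (events.foldl pvStepB (d, best)).2 := by
  induction events with
  | nil => intro d best h; exact ⟨rfl, h⟩
  | cons ev rest ih =>
    intro d best h
    simp only [List.foldl_cons]
    have hstep := pvStep_inv d best ev h
    have hrw : pvStepB (d, best) ev = ((pvStepB (d, best) ev).1, (pvStepB (d, best) ev).2) := rfl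
    rw [hrw]
    obtain ⟨h1, h2⟩ := ih (pvStepB (d, best) ev).1 (pvStepB (d, best) ev).2 hstep
    exact ⟨by rw [← h1, pvStep_fst], h2⟩

theorem pv_out (d : PySem.Dict String Int) (best : Option (Int × String)) (hinv : pvInv d best) :
    (match PySem.List.sorted2 (d.items.map (fun p => (p.2, p.1))) Prod.fst Prod.snd true with
     | [] => none
     | p :: _ => some p.2) =
    Option.map (fun b => b.2) best := by
  rcases hinv.2 with ⟨hbn, hitems⟩ | ⟨c, h, hbs, hmem, hmax⟩
  · subst hbn
    rw [hitems]
    rfl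
  · subst hbs
    have hmemL : (c, h) ∈ d.items.map (fun p => (p.2, p.1)) :=
      List.mem_map.2 ⟨(h, c), hmem, rfl⟩
    have hperm := PySem.List.sorted2_perm (d.items.map (fun p => (p.2, p.1))) Prod.fst Prod.snd true
    cases hs : PySem.List.sorted2 (d.items.map (fun p => (p.2, p.1))) Prod.fst Prod.snd true with
    | nil =>
      rw [hs] at hperm
      exact absurd (hperm.mem_iff.2 hmemL) List.not_mem_nil
    | cons m t =>
      have hhm : pvHeadMax (m :: t) := by
        rw [← hs, pv_sorted2_rev_eq]
        exact pv_foldl_insertBy_headMax _ [] (by intro m hm; simp at hm)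
      have hmmem : m ∈ d.items.map (fun p => (p.2, p.1)) := by
        rw [hs] at hperm
        exact hperm.mem_iff.1 List.mem_cons_self
      by_cases hme : m = (c, h)
      · subst hme; rfl
      · exfalso
        obtain ⟨p, hp, hpm⟩ := List.mem_map.1 hmmem
        have hpne : p ≠ (h, c) := by
          intro he; subst he; exact hme hpm.symm
        have hltm : pvLt m (c, h) := by rw [← hpm]; exact hmax p hp hpne
        have hch : (c, h) ∈ m :: t := by
          rw [hs] at hperm
          exact hperm.mem_iff.2 hmemL
        have := hhm m rfl (c, h) hch
        rw [Bool.eq_false_iff] at this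
        exact this ((pvLtb_iff _ _).2 hltm)

theorem pvInv_init : pvInv PySem.Dict.empty none :=
  ⟨PySem.Dict.nodup_keys_empty, Or.inl ⟨rfl, rfl⟩⟩

-- ===== VERDICT (by name: the statement is the Claim_ definition above) =====
theorem most_common_hostname_py_spec : Claim_equal_most_common_hostname_py := by
  unfold Claim_equal_most_common_hostname_py
  intro events _
  unfold Spec_most_common_hostname_py most_common_hostname_py most_common_hostname_py_alt
  obtain ⟨h1, h2⟩ := pv_fold events PySem.Dict.empty none pvInv_init
  have hA : events.foldl
      (fun (d : PySem.Dict String Int) ev =>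
        match pvGetHost ev with
        | none => d
        | some host => d.insert host (if d.contains host then (d.get? host).getD 0 + 1 else 1))
      PySem.Dict.empty = events.foldl pvStepA PySem.Dict.empty := rfl
  have hB : events.foldl
      (fun (st : PySem.Dict String Int × Option (Int × String)) ev =>
        match pvGetHost ev with
        | none => st
        | some host =>
          let count := st.1.getD host 0 + 1
          let best := match st.2 with
            | none => some (count, host)
            | some b =>
              if decide (b.1 < count) || (b.1 == count && decide (b.2 < host)) then some (count, host)
              else some b
          (st.1.insert host count, best))
      (PySem.Dict.empty, none) = events.foldl pvStepB (PySem.Dict.empty, none) := rfl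
  simp only [hA, hB, h1]
  have hout := pv_out _ _ h2
  cases hfin : (List.foldl pvStepB (PySem.Dict.empty, none) events).2 with
  | none => rw [hfin] at hout; exact hout
  | some b => rw [hfin] at hout; exact hout
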